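-- pv_equiv track=rewrite | github.com/JosephSamela/google-foobar | level2/lovely_lucky_lambs.py | answer
-- ===== SOURCE A (Python) =====
-- def answer(total_lambs):
--
--     # Here's how I solved it..
--
--     # From the promblem we know:
--     #   MIN Paycheck = sum of previous 2 paychecks
--     #   MAX Paycheck = x2 previous paycheck
--
--     # I wrote the function "calc_paychecks" that
--     # builds lists of paychecks from these rules.
--
--     # ex. total_lambs = 5
--     #   min_paychecks = [1, 1, 2]
--     #   max_paychecks = [1, 2]
--
--     # The function also handles remaining lambs.
--     # When remaining lambs CANNOT pay a FULL paycheck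
--     # but CAN pay more at least the min_paycheck -
--     # then henchmen is still hired.
--
--     # ex. total_lambs = 6
--     #   min_paychecks = [1, 1, 2]
--     #   max_paychecks = [1, 2, 3] <- 3 is remainder
--
--     def calc_paychecks(total_lambs, max_min):
--
--         # Problem says first paycheck is 1 lamb
--         paychecks = [0,1]
--
--         # While there's money left keep hiring henchmen
--         while sum(paychecks) < total_lambs:
--             # Previous two paychecks
--             prev_paycheck_1 = paychecks[-1]
--             prev_paycheck_2 = paychecks[-2]
--             # Maxmum / Minimum possible paychecks
--             max_paycheck = prev_paycheck_1 * 2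
--             min_paycheck = prev_paycheck_1 + prev_paycheck_2
--
--             if max_min == "max":
--                 paycheck = max_paycheck
--             elif max_min == "min":
--                 paycheck = min_paycheck
--
--             remainder = total_lambs - sum(paychecks)
--
--             # If remainder can pay FULL salary...
--             if remainder >= paycheck:
--                 paychecks.append(paycheck)
--                 continue
--             # If remainder CANNOT pay FULL salary
--             # but CAN pay more than min_paycheck...
--             elif remainder >= min_paycheck:
--                 if max_min == "max":
--                     paychecks.append(remainder)
--                 elif max_min == "min":
--                     paychecks.append(min_paycheck)
--             # If remainder CANNOT pay more than min_paycheck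
--             # We're outta lambs, can't afford another paycheck.
--             else:
--                 break
--
--         return paychecks
--
--     # Find MAX and MIN number of paychecks
--     min_paychecks = calc_paychecks(total_lambs, "min")
--     max_paychecks = calc_paychecks(total_lambs, "max")
--
--     # Solution is min-cost-solution minus max-cost-solution!
--     solution = len(min_paychecks) - len(max_paychecks)
--
--     return solution
-- ===== SOURCE B (Python) =====
-- def answer(total_lambs):
--     # Arithmetic recurrences instead of building paycheck lists:
--     # min side counts Fibonacci payments whose running sum stays within budget;
--     # max side is closed-form via bit_length (full payments 1,2,4,... sum to 2^j-1)
--     # plus one partial payment when the leftover covers the minimal legal paycheck.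
--     if total_lambs <= 1:
--         return 0
--     a, b, s, mn = 1, 1, 0, 0
--     while s + a <= total_lambs:
--         s, a, b, mn = s + a, b, a + b, mn + 1
--     j = (total_lambs + 1).bit_length() - 1
--     r = total_lambs - (2 ** j - 1)
--     minpay = 1 if j == 1 else 3 * 2 ** (j - 2)
--     mx = j + (1 if r >= minpay else 0)
--     return mn - mx
-- ===== Notes on version B (the rewrite author's own statement) =====
-- stated objective: alternative
-- what changed: Instead of building paycheck lists and re-summing them each iteration, B counts min-side payments with a scalar Fibonacci running-sum loop and computes the max-side count in closed form from bit_length (full payments 1,2,4,... sum to 2^j-1, plus one arithmetic partial-paycheck test).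
import Mathlib
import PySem

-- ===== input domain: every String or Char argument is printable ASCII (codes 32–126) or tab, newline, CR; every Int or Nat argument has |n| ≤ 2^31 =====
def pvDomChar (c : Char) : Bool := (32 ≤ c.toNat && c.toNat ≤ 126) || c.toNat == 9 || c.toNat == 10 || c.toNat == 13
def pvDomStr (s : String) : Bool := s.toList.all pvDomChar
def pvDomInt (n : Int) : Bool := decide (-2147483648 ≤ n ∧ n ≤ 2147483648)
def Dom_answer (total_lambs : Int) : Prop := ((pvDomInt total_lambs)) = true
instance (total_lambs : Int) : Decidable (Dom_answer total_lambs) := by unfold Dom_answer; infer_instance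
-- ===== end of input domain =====

-- B replaces A's list-building loops by arithmetic: a scalar Fibonacci running-sum
-- loop for the min side and a closed-form bit_length count (plus one
-- partial-paycheck test) for the max side.

-- ===== PORT A =====
-- paychecks[-1] / paychecks[-2]; the list always has ≥ 2 elements, so the
-- IndexError case (none) is unreachable and .getD 0 is never used.
def pyLast (l : List Int) (i : Int) : Int := (PySem.List.pyGet? l i).getD 0

-- A's while loop; the fuel argument only makes the recursion total (each
-- iteration that continues raises the sum by at least 1, so total_lambs.toNat + 1
-- iterations always suffice and the fuel-0 case is unreachable from answer).
-- A is only called with "max"/"min"; any other string would be a Python NameError.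
def calcPaychecks (fuel : Nat) (total_lambs : Int) (maxMin : String) (paychecks : List Int) : List Int :=
  match fuel with
  | 0 => paychecks
  | fuel + 1 =>
    if paychecks.sum < total_lambs then
      let prev1 := pyLast paychecks (-1)
      let prev2 := pyLast paychecks (-2)
      let maxP := prev1 * 2
      let minP := prev1 + prev2
      let paycheck := if maxMin == "max" then maxP else minP
      let remainder := total_lambs - paychecks.sum
      if paycheck ≤ remainder then
        calcPaychecks fuel total_lambs maxMin (paychecks ++ [paycheck])
      else if minP ≤ remainder then
        calcPaychecks fuel total_lambs maxMin
          (if maxMin == "max" then paychecks ++ [remainder] else paychecks ++ [minP])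
      else paychecks
    else paychecks

def answer (total_lambs : Int) : Int :=
  ((calcPaychecks (total_lambs.toNat + 1) total_lambs "min" [0, 1]).length : Int)
    - ((calcPaychecks (total_lambs.toNat + 1) total_lambs "max" [0, 1]).length : Int)

-- ===== PORT B =====
-- B's min-side while loop (scalar Fibonacci running sum); fuel is only a totality guard.
def fibLoop (fuel : Nat) (total_lambs a b s mn : Int) : Int :=
  match fuel with
  | 0 => mn
  | fuel + 1 =>
    if s + a ≤ total_lambs then fibLoop fuel total_lambs b (a + b) (s + a) (mn + 1) else mn

-- (total_lambs + 1).bit_length() - 1 is ported as PySem.Int.bitLength _ - 1.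
def answer_alt (total_lambs : Int) : Int :=
  if total_lambs ≤ 1 then 0
  else
    let mn := fibLoop (total_lambs.toNat + 1) total_lambs 1 1 0 0
    let j := PySem.Int.bitLength (total_lambs + 1) - 1
    let r := total_lambs - (2 ^ j - 1)
    let minpay : Int := if j = 1 then 1 else 3 * 2 ^ (j - 2)
    let mx : Int := (j : Int) + (if minpay ≤ r then 1 else 0)
    mn - mx

-- ===== PRECONDITION & SPEC =====
def Spec_answer (total_lambs : Int) (out : Int) : Prop := out = answer_alt total_lambs
instance (total_lambs : Int) (out : Int) : Decidable (Spec_answer total_lambs out) := by unfold Spec_answer; infer_instance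

-- ===== CLAIM (what is proved, stated in full; the proofs are below) =====
def Claim_equal_answer : Prop := ∀ (total_lambs : Int), Dom_answer total_lambs → Spec_answer total_lambs (answer total_lambs)

-- ===== LEMMAS AND PROOFS =====

theorem fibLoop_shift (fuel : Nat) (t a b s mn : Int) :
    fibLoop fuel t a b s mn = mn + fibLoop fuel t a b s 0 := by
  induction fuel generalizing a b s mn with
  | zero => simp [fibLoop]
  | succ n ih =>
    simp only [fibLoop]
    split
    · conv_lhs => rw [ih]
      conv_rhs => rw [ih]
      omega
    · simp

theorem fibLoop_congr (f : Nat) (t a a' b b' s s' m : Int)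
    (ha : a = a') (hb : b = b') (hs : s = s') :
    fibLoop f t a b s m = fibLoop f t a' b' s' m := by rw [ha, hb, hs]

theorem fibLoop_stable (fuel fuel' : Nat) (t a b s : Int)
    (ha : 1 ≤ a) (hb : 1 ≤ b)
    (hf : (t - s).toNat < fuel) (hf' : (t - s).toNat < fuel') :
    fibLoop fuel t a b s 0 = fibLoop fuel' t a b s 0 := by
  induction fuel generalizing fuel' a b s with
  | zero => omega
  | succ n ih =>
    obtain ⟨m, rfl⟩ : ∃ m, fuel' = m + 1 := ⟨fuel' - 1, by omega⟩
    simp only [fibLoop]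
    split
    · rw [fibLoop_shift, fibLoop_shift m]
      rw [ih m b (a + b) (s + a) hb (by omega) (by omega) (by omega)]
    · rfl

-- min-side simulation: A's "min" loop appends exactly the payments B's fibLoop counts
theorem sim_min (fuel : Nat) (t : Int) (l : List Int) (p2 p1 : Int)
    (hp2 : 0 ≤ p2) (hp1 : 1 ≤ p1) :
    ((calcPaychecks fuel t "min" (l ++ [p2, p1])).length : Int)
      = (l.length + 2 : Int) + fibLoop fuel t (p1 + p2) (p1 + (p1 + p2)) ((l ++ [p2, p1]).sum) 0 := by
  induction fuel generalizing l p2 p1 with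
  | zero => simp [calcPaychecks, fibLoop]
  | succ n ih =>
    have hsplit : l ++ [p2, p1] = (l ++ [p2]) ++ [p1] := by simp
    have hlast1 : pyLast (l ++ [p2, p1]) (-1) = p1 := by
      rw [pyLast, hsplit, PySem.List.pyGet?_neg_one_append_singleton]; rfl
    have hlast2 : pyLast (l ++ [p2, p1]) (-2) = p2 := by
      have h2 : (2 : Nat) ≤ (l ++ [p2, p1]).length := by simp
      rw [pyLast, PySem.List.pyGet?_neg_ofNat _ 2 (by omega) h2]
      simp
    simp only [calcPaychecks, fibLoop, hlast1, hlast2]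
    simp only [String.reduceBEq, Bool.false_eq_true, if_false]
    by_cases hcond : (l ++ [p2, p1]).sum + (p1 + p2) ≤ t
    · have hlt : (l ++ [p2, p1]).sum < t := by
        have : (1:Int) ≤ p1 + p2 := by omega
        omega
      rw [if_pos hlt, if_pos (by omega), if_pos hcond]
      have hre : (l ++ [p2, p1]) ++ [p1 + p2] = (l ++ [p2]) ++ [p1, p1 + p2] := by simp
      rw [hre, ih (l ++ [p2]) p1 (p1 + p2) (by omega) (by omega)]
      rw [fibLoop_shift n t _ _ _ (0 + 1)]
      rw [fibLoop_congr n t ((p1 + p2) + p1) (p1 + (p1 + p2))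
        ((p1 + p2) + ((p1 + p2) + p1)) ((p1 + p2) + (p1 + (p1 + p2)))
        ((l ++ [p2]) ++ [p1, p1 + p2]).sum ((l ++ [p2, p1]).sum + (p1 + p2))
        0 (by ring) (by ring) (by simp; ring)]
      simp only [List.length_append, List.length_cons, List.length_nil]
      push_cast
      ring
    · by_cases hlt : (l ++ [p2, p1]).sum < t
      · rw [if_pos hlt, if_neg (by omega), if_neg (by omega), if_neg hcond]
        simp
      · rw [if_neg hlt, if_neg (by omega)]
        simp

-- max-side: from a reached state [.., 2^k, 2^(k+1)] with sum 2^(k+2)-1 ≤ t,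
-- A appends j-(k+2) further full paychecks and possibly one partial one,
-- where j satisfies 2^j - 1 ≤ t < 2^(j+1) - 1.
theorem sim_max (fuel : Nat) (t : Int) (j : Nat)
    (hj1 : (2 : Int) ^ j - 1 ≤ t) (hj2 : t < 2 ^ (j + 1) - 1) :
    ∀ (l : List Int) (k : Nat),
    (l ++ [(2 : Int) ^ k, 2 ^ (k + 1)]).sum = 2 ^ (k + 2) - 1 →
    (2 : Int) ^ (k + 2) - 1 ≤ t →
    (t - ((2 : Int) ^ (k + 2) - 1)).toNat < fuel →
    ((calcPaychecks fuel t "max" (l ++ [(2 : Int) ^ k, 2 ^ (k + 1)])).length : Int)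
      = l.length + 2 + ((j : Int) - (k + 2))
        + (if (3 : Int) * 2 ^ (j - 2) ≤ t - (2 ^ j - 1) then 1 else 0) := by
  induction fuel with
  | zero => intro l k _ _ h; omega
  | succ n ih =>
    intro l k hsum hle hfuel
    have hk2 : k + 2 ≤ j := by
      by_contra h
      have h1 : j + 1 ≤ k + 2 := by omega
      have : (2 : Int) ^ (j + 1) ≤ 2 ^ (k + 2) := pow_le_pow_right₀ (by norm_num) h1
      omega
    have hpow1 : (1 : Int) ≤ 2 ^ k := one_le_pow₀ (by norm_num)
    have hsplit : l ++ [(2 : Int) ^ k, 2 ^ (k + 1)] = (l ++ [(2 : Int) ^ k]) ++ [(2 : Int) ^ (k + 1)] := by simp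
    have hlast1 : pyLast (l ++ [(2 : Int) ^ k, 2 ^ (k + 1)]) (-1) = 2 ^ (k + 1) := by
      rw [pyLast, hsplit, PySem.List.pyGet?_neg_one_append_singleton]; rfl
    have hlast2 : pyLast (l ++ [(2 : Int) ^ k, 2 ^ (k + 1)]) (-2) = 2 ^ k := by
      have h2 : (2 : Nat) ≤ (l ++ [(2 : Int) ^ k, 2 ^ (k + 1)]).length := by simp
      rw [pyLast, PySem.List.pyGet?_neg_ofNat _ 2 (by omega) h2]
      simp
    simp only [calcPaychecks, hlast1, hlast2]
    simp only [String.reduceBEq, if_true]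
    rw [hsum]
    by_cases hstop : (2 : Int) ^ (k + 2) - 1 < t
    · rw [if_pos hstop]
      by_cases hfull : (2 : Int) ^ (k + 1) * 2 ≤ t - (2 ^ (k + 2) - 1)
      · rw [if_pos hfull]
        have hre : (l ++ [(2 : Int) ^ k, 2 ^ (k + 1)]) ++ [(2 : Int) ^ (k + 1) * 2]
            = (l ++ [(2 : Int) ^ k]) ++ [(2 : Int) ^ (k + 1), 2 ^ (k + 1 + 1)] := by
          simp [pow_succ]
        rw [hre]
        have hsum' : ((l ++ [(2 : Int) ^ k]) ++ [(2 : Int) ^ (k + 1), 2 ^ (k + 1 + 1)]).sum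
            = 2 ^ (k + 1 + 2) - 1 := by
          have h1 : ((l ++ [(2 : Int) ^ k]) ++ [(2 : Int) ^ (k + 1), 2 ^ (k + 1 + 1)]).sum
              = (l ++ [(2 : Int) ^ k, 2 ^ (k + 1)]).sum + 2 ^ (k + 2) := by
            simp; ring
          rw [h1, hsum]; ring
        have hle' : (2 : Int) ^ (k + 1 + 2) - 1 ≤ t := by
          have h1 : (2 : Int) ^ (k + 1 + 2) = 2 ^ (k + 2) + 2 ^ (k + 1) * 2 := by ring
          omega
        rw [ih (l ++ [(2 : Int) ^ k]) (k + 1) hsum' hle' (by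
          have h1 : (2 : Int) ^ (k + 1 + 2) - 1 = (2 ^ (k + 2) - 1) + 2 ^ (k + 1) * 2 := by ring
          have h2 : (1 : Int) ≤ 2 ^ (k + 1) * 2 := by
            have h3 : (1 : Int) ≤ 2 ^ (k + 1) := one_le_pow₀ (by norm_num)
            nlinarith
          omega)]
        simp only [List.length_append, List.length_cons, List.length_nil]
        push_cast
        ring
      · rw [if_neg hfull]
        have hjk : j = k + 2 := by
          by_contra h
          have hk3 : k + 3 ≤ j := by omega
          have h1 : (2 : Int) ^ (k + 3) ≤ 2 ^ j := pow_le_pow_right₀ (by norm_num) hk3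
          have h23 : (2 : Int) ^ (k + 3) = (2 ^ (k + 2) - 1) + (2 ^ (k + 1) * 2) + 1 := by ring
          omega
        subst hjk
        have hmp : (3 : Int) * 2 ^ (k + 2 - 2) = 2 ^ (k + 1) + 2 ^ k := by
          have h1 : k + 2 - 2 = k := by omega
          rw [h1]; ring
        by_cases hpart : (2 : Int) ^ (k + 1) + 2 ^ k ≤ t - (2 ^ (k + 2) - 1)
        · rw [if_pos hpart]
          obtain ⟨m, rfl⟩ : ∃ m, n = m + 1 := by
            refine ⟨n - 1, ?_⟩
            have h1 : (1 : Int) ≤ 2 ^ (k + 1) := one_le_pow₀ (by norm_num)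
            omega
          simp only [calcPaychecks]
          rw [if_neg (by
            have h1 : ((l ++ [(2 : Int) ^ k, 2 ^ (k + 1)]) ++ [t - (2 ^ (k + 2) - 1)]).sum
                = (l ++ [(2 : Int) ^ k, 2 ^ (k + 1)]).sum + (t - (2 ^ (k + 2) - 1)) := by simp; ring
            rw [h1, hsum]
            omega)]
          rw [hmp, if_pos hpart]
          simp only [List.length_append, List.length_cons, List.length_nil]
          push_cast
          ring
        · rw [if_neg hpart, hmp, if_neg hpart]
          simp only [List.length_append, List.length_cons, List.length_nil]
          push_cast
          ring
    · rw [if_neg hstop]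
      have hjk : j = k + 2 := by
        by_contra h
        have hk3 : k + 3 ≤ j := by omega
        have h1 : (2 : Int) ^ (k + 3) ≤ 2 ^ j := pow_le_pow_right₀ (by norm_num) hk3
        have h23 : (2 : Int) ^ (k + 3) = 2 * 2 ^ (k + 2) := by ring
        omega
      subst hjk
      have hmp : (3 : Int) * 2 ^ (k + 2 - 2) = 2 ^ (k + 1) + 2 ^ k := by
        have h1 : k + 2 - 2 = k := by omega
        rw [h1]; ring
      rw [hmp, if_neg (by
        have h1 : (1 : Int) ≤ 2 ^ (k + 1) := one_le_pow₀ (by norm_num)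
        omega)]
      simp only [List.length_append, List.length_cons, List.length_nil]
      push_cast
      ring

theorem answer_eq_alt (t : Int) : answer t = answer_alt t := by
  by_cases hle : t ≤ 1
  · -- loop body never runs on either side
    unfold answer answer_alt
    rw [if_pos hle]
    simp only [calcPaychecks]
    rw [if_neg (by simp; omega), if_neg (by simp; omega)]
    simp
  · have hgt : 1 < t := by omega
    rcases eq_or_lt_of_le (show (2:Int) ≤ t by omega) with h2 | h3
    · subst h2; decide
    · -- t ≥ 3
      have ht3 : (3 : Int) ≤ t := by omega
      -- min side
      have hmin : ((calcPaychecks (t.toNat + 1) t "min" [0, 1]).length : Int)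
          = 2 + fibLoop (t.toNat + 1) t 1 2 1 0 := by
        have := sim_min (t.toNat + 1) t [] 0 1 (by norm_num) (by norm_num)
        simpa using this
      have hmnB : fibLoop (t.toNat + 1) t 1 1 0 0
          = 1 + fibLoop (t.toNat + 1) t 1 2 1 0 := by
        have hstep : fibLoop (t.toNat + 1) t 1 1 0 0
            = fibLoop t.toNat t 1 2 1 1 := by
          simp only [fibLoop]
          rw [if_pos (by omega)]
          norm_num
        rw [hstep, fibLoop_shift]
        rw [fibLoop_stable t.toNat (t.toNat + 1) t 1 2 1 (by norm_num) (by norm_num)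
          (by omega) (by omega)]
      -- max side: the first iteration appends the full paycheck 2
      have hmaxstep : calcPaychecks (t.toNat + 1) t "max" [0, 1]
          = calcPaychecks t.toNat t "max" [0, 1, 2] := by
        simp only [calcPaychecks, pyLast]
        norm_num [PySem.List.pyGet?, PySem.List.pyIdx?]
        rw [if_pos (show (1:Int) < t by omega), if_pos (show (2:Int) < t by omega)]
      unfold answer answer_alt
      simp only [if_neg (show ¬ t ≤ 1 by omega)]
      set L := PySem.Int.bitLength (t + 1) with hL
      have habs : ((t + 1).natAbs : Int) = t + 1 := Int.natAbs_of_nonneg (by omega)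
      have hub : (t + 1 : Int) < 2 ^ L := by
        have := PySem.Int.lt_two_pow_bitLength (t + 1)
        calc (t + 1 : Int) = ((t+1).natAbs : Int) := habs.symm
          _ < ((2 ^ L : Nat) : Int) := by exact_mod_cast this
          _ = 2 ^ L := by push_cast; ring
      have hlb : (2 : Int) ^ (L - 1) ≤ t + 1 := by
        have := PySem.Int.two_pow_bitLength_le (t + 1) (by omega)
        calc (2 : Int) ^ (L - 1) = ((2 ^ (L - 1) : Nat) : Int) := by push_cast; ring
          _ ≤ ((t+1).natAbs : Int) := by exact_mod_cast this
          _ = t + 1 := habs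
      have hL3 : 3 ≤ L := by
        by_contra h
        have h2 : L ≤ 2 := by omega
        have : (2 : Int) ^ L ≤ 2 ^ 2 := pow_le_pow_right₀ (by norm_num) h2
        omega
      set j := L - 1 with hj
      have hjL : j + 1 = L := by omega
      have hj1 : (2 : Int) ^ j - 1 ≤ t := by omega
      have hj2 : t < 2 ^ (j + 1) - 1 := by rw [hjL]; omega
      have hj2' : 2 ≤ j := by omega
      have hform : ([0, 1, 2] : List Int) = [0] ++ [(2:Int) ^ 0, 2 ^ (0 + 1)] := by norm_num
      have hmax : ((calcPaychecks t.toNat t "max" [0, 1, 2]).length : Int)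
          = 1 + 2 + ((j : Int) - 2)
            + (if (3 : Int) * 2 ^ (j - 2) ≤ t - (2 ^ j - 1) then 1 else 0) := by
        rw [hform]
        have := sim_max t.toNat t j hj1 hj2 [0] 0 (by norm_num) (by norm_num; omega) (by omega)
        simpa using this
      rw [hmin, hmaxstep, hmax, hmnB, if_neg (show ¬ j = 1 by omega)]
      ring

-- ===== VERDICT (by name: the statement is the Claim_ definition above) =====
theorem answer_spec : Claim_equal_answer := by
  intro t _
  exact answer_eq_alt t
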